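-- pv_equiv track=rewrite | github.com/isilanes/espublico-tech | reto2/reto2.py | translate_word
-- ===== SOURCE A (Python) =====
-- def translate_word(word):
--     """Translate a single word."""
--
--     # If no [ ] in word, return word itself:
--     if "[" not in word:
--         return word
--
--     # Read from left up to first [:
--     left = ""
--     multiplier = ""
--     for i, letter in enumerate(word):
--         if letter == "[":
--             break
--
--         try:
--             x = int(letter)
--             multiplier += letter
--         except ValueError:
--             left += letter
--
--     # Read from right up to first ]:
--     right = ""
--     for j, letter in enumerate(word[::-1]):
--         if letter == "]":
--             break
--
--         right += letter
--
--     right = right[::-1]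
--
--     # Text in the middle, and how many times to multiply it:
--     middle = word[i+1:-j-1]
--     multiplier = int(multiplier)
--
--     return left + multiplier*translate_word(middle) + right
-- ===== SOURCE B (Python) =====
-- def translate_word(word):
--     """Translate a single word."""
--     # Peel bracket layers iteratively, pushing (left, multiplier, right) frames.
--     stack = []
--     while "[" in word:
--         i = word.index("[")
--         r = word.rindex("]")
--         head = word[:i]
--         multiplier = int("".join(c for c in head if c.isdigit()))
--         left = "".join(c for c in head if not c.isdigit())
--         stack.append((left, multiplier, word[r + 1:]))
--         word = word[i + 1:r]
--     # Rebuild from the innermost core outwards.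
--     core = word
--     while stack:
--         left, multiplier, right = stack.pop()
--         core = left + multiplier * core + right
--     return core
-- ===== Notes on version B (the rewrite author's own statement) =====
-- stated objective: alternative
-- what changed: Replaces A's recursion (per level: one char-by-char left scan building left/multiplier, one char-by-char scan over the reversed word, then a recursive call) with an iterative two-phase algorithm: a peel loop that pushes (left, multiplier, right) frames onto an explicit stack using index/rindex and digit filters, then a rebuild loop that pops the frames around the innermost core; …
-- outside the precondition, e.g. on translate_word('2[ab'): A returns '2[ab', B raises ValueError; on translate_word('aa1['): A returns 'aaaa1[', B raises ValueError
import Mathlib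
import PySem

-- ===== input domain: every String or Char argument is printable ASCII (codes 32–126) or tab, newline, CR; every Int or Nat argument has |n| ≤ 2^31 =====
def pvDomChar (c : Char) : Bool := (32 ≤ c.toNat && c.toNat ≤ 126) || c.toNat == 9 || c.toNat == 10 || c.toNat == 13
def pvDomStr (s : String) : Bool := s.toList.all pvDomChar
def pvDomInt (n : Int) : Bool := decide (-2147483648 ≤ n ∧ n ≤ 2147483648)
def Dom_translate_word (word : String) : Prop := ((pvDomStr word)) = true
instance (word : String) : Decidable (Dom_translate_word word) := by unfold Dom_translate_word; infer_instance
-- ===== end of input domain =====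

-- B replaces A's recursion with an explicit-stack peel loop plus a rebuild loop (different decomposition, same values on well-bracketed input).

-- ===== PORT A =====
-- left scan: 'for i, letter in enumerate(word): if letter == "[": break; try int → multiplier else left'
-- ('try: int(letter) / except ValueError' is tested via isdigit: on a single char int succeeds exactly for '0'..'9' on the ASCII domain)
def pvScanLeft : List Char → Nat → List Char → List Char → Nat × List Char × List Char
  | [], i, left, mult => (i - 1, left, mult)          -- loop fell off the end: i keeps its last value
  | c :: rest, i, left, mult =>
    if c = '[' then (i, left, mult)
    else if PySem.Chars.isdigit c then pvScanLeft rest (i + 1) left (mult ++ [c])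
    else pvScanLeft rest (i + 1) (left ++ [c]) mult

-- right scan over word[::-1]: 'if letter == "]": break; right += letter'
def pvScanRight : List Char → Nat → List Char → Nat × List Char
  | [], j, right => (j - 1, right)                    -- loop fell off the end: j keeps its last value
  | c :: rest, j, right =>
    if c = ']' then (j, right)
    else pvScanRight rest (j + 1) (right ++ [c])

def pvA (w : List Char) : List Char :=
  if _hin : PySem.Chars.isIn ['['] w = false then w
  else
    let t1 := pvScanLeft w 0 [] []                    -- (i, left, multiplier)
    let t2 := pvScanRight w.reverse 0 []              -- (j, right-reversed)
    let middle := PySem.List.slice w (some ((t1.1 : Int) + 1)) (some (-(t2.1 : Int) - 1))  -- word[i+1:-j-1]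
    match PySem.Int.ofChars? t1.2.2 with
    | none => []                                      -- Python raises ValueError here (int("")); excluded by Pre_
    | some m => t1.2.1 ++ PySem.List.pyRepeat (pvA middle) m ++ t2.2.reverse
termination_by w.length
decreasing_by
  have hin' : PySem.Chars.isIn ['['] w = true := by simpa using _hin
  have hmem : '[' ∈ w := by
    have := (PySem.Chars.isIn_iff_infix ['['] w).mp hin'
    rwa [List.singleton_infix_iff] at this
  have hlen : 1 ≤ w.length := List.length_pos_of_mem hmem
  have key : ∀ (b : Int) (k : Nat), (PySem.List.slice w (some ((k : Int) + 1)) (some b)).length < w.length := by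
    intro b k
    rw [PySem.List.length_slice]
    have h2 := PySem.List.clampIdx_le w.length b
    have h1 : PySem.List.clampIdx w.length ((k : Int) + 1) = min (k + 1) w.length := by
      rw [show ((k : Int) + 1) = ((k + 1 : Nat) : Int) by push_cast; ring, PySem.List.clampIdx_natCast]
    omega
  exact key _ _

def translate_word (word : String) : String := String.ofList (pvA word.toList)

-- ===== PORT B =====
-- phase 1: while "[" in word, peel one layer and push (left, multiplier, right)
def pvPeel (w : List Char) (stack : List (List Char × Int × List Char)) :
    List Char × List (List Char × Int × List Char) :=
  if _hin : PySem.Chars.isIn ['['] w = false then (w, stack)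
  else
    match PySem.List.index? w '[' with
    | none => (w, stack)                              -- unreachable: "[" ∈ word
    | some i =>
      match PySem.List.index? w.reverse ']' with
      | none => ([], stack)                           -- word.rindex("]") raises ValueError; excluded by Pre_
      | some k =>
        let r := w.length - 1 - k                     -- index of the last "]"
        let head := PySem.List.slice w none (some (i : Int))                  -- word[:i]
        match PySem.Int.ofChars? (head.filter PySem.Chars.isdigit) with
        | none => ([], stack)                         -- Python raises ValueError here (int("")); excluded by Pre_
        | some m =>
          let left := head.filter (fun c => ! PySem.Chars.isdigit c)
          let right := PySem.List.slice w (some ((r : Int) + 1)) none         -- word[r+1:]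
          let middle := PySem.List.slice w (some ((i : Int) + 1)) (some (r : Int))  -- word[i+1:r]
          pvPeel middle ((left, m, right) :: stack)
termination_by w.length
decreasing_by
  have hin' : PySem.Chars.isIn ['['] w = true := by simpa using _hin
  have hmem : '[' ∈ w := by
    have := (PySem.Chars.isIn_iff_infix ['['] w).mp hin'
    rwa [List.singleton_infix_iff] at this
  have hlen : 1 ≤ w.length := List.length_pos_of_mem hmem
  have key : ∀ (b : Int) (k : Nat), (PySem.List.slice w (some ((k : Int) + 1)) (some b)).length < w.length := by
    intro b k
    rw [PySem.List.length_slice]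
    have h2 := PySem.List.clampIdx_le w.length b
    have h1 : PySem.List.clampIdx w.length ((k : Int) + 1) = min (k + 1) w.length := by
      rw [show ((k : Int) + 1) = ((k + 1 : Nat) : Int) by push_cast; ring, PySem.List.clampIdx_natCast]
    omega
  exact key _ _

-- phase 2: pop frames, core = left + multiplier*core + right
def pvRebuild : List (List Char × Int × List Char) → List Char → List Char
  | [], core => core
  | (l, m, r) :: rest, core => pvRebuild rest (l ++ PySem.List.pyRepeat core m ++ r)

def translate_word_alt (word : String) : String :=
  let p := pvPeel word.toList []
  String.ofList (pvRebuild p.2 p.1)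

-- ===== PRECONDITION & SPEC =====
-- Pre_ excludes inputs where some bracket layer (first "[" to last "]") has no digit before its
-- first "[" — there A raises ValueError at int("") — and inputs where some layer contains a "["
-- but no "]" — there A's reversed scan never breaks and it returns the word with the unexpanded
-- bracket glued back on, an accident of its implementation, while B's rindex raises ValueError.
-- The check recurses over the nested layers because A's per-layer condition is itself recursive;
-- each step strictly shortens the word, so the fuel (the word's length) never runs out.
def pvWellFormed : Nat → List Char → Bool
  | 0, _ => true
  | d + 1, w =>
    if PySem.Chars.isIn ['['] w = true then
      let i := (PySem.List.index? w '[').getD 0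
      ((PySem.List.slice w none (some (i : Int))).any PySem.Chars.isdigit) &&
      (PySem.Chars.isIn [']'] w = true) &&
      pvWellFormed d (PySem.List.slice w (some ((i : Int) + 1))
        (some ((w.length - 1 - (PySem.List.index? w.reverse ']').getD 0 : Nat) : Int)))
    else true

def Pre_translate_word (word : String) : Prop := pvWellFormed word.toList.length word.toList = true
instance (word : String) : Decidable (Pre_translate_word word) := by unfold Pre_translate_word; infer_instance
def pvWitness_translate_word : String := "2[ab]"

def Spec_translate_word (word : String) (out : String) : Prop := out = translate_word_alt word
instance (word : String) (out : String) : Decidable (Spec_translate_word word out) := by unfold Spec_translate_word; infer_instance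

-- ===== CLAIM (what is proved, stated in full; the proofs are below) =====
def Claim_equal_translate_word : Prop := ∀ (word : String), Dom_translate_word word → Pre_translate_word word → Spec_translate_word word (translate_word word)

-- ===== LEMMAS AND PROOFS =====

theorem pv_mem_split_first {c : Char} {w : List Char} (h : c ∈ w) :
    ∃ p s, w = p ++ c :: s ∧ c ∉ p := by
  induction w with
  | nil => cases h
  | cons a t ih =>
    by_cases hac : a = c
    · exact ⟨[], t, by simp [hac], by simp⟩
    · have : c ∈ t := by cases h with
        | head => exact absurd rfl hac
        | tail _ h => exact h
      obtain ⟨p, s, hw, hp⟩ := ih this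
      exact ⟨a :: p, s, by simp [hw], by
        intro hmemc
        rcases List.mem_cons.mp hmemc with h | h
        · exact hac h.symm
        · exact hp h⟩

theorem pv_mem_split_last {c : Char} {w : List Char} (h : c ∈ w) :
    ∃ q t, w = q ++ c :: t ∧ c ∉ t := by
  obtain ⟨p, s, hw, hp⟩ := pv_mem_split_first (w := w.reverse) (List.mem_reverse.mpr h)
  refine ⟨s.reverse, p.reverse, ?_, by simpa using hp⟩
  have := congrArg List.reverse hw
  simpa using this

theorem pvScanLeft_spec (p : List Char) (s : List Char) :
    ∀ (k : Nat) (l m : List Char), '[' ∉ p →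
      pvScanLeft (p ++ '[' :: s) k l m =
        (k + p.length, l ++ p.filter (fun c => ! PySem.Chars.isdigit c), m ++ p.filter PySem.Chars.isdigit) := by
  induction p with
  | nil => intro k l m _; simp [pvScanLeft]
  | cons c p ih =>
    intro k l m hp
    have hc : ¬ (c = '[') := by simp at hp; exact fun h => hp.1 h.symm
    have hp' : '[' ∉ p := by simp at hp; exact hp.2
    by_cases hd : PySem.Chars.isdigit c
    · simp [pvScanLeft, hc, hd, ih (k + 1) l (m ++ [c]) hp']
      omega
    · simp [pvScanLeft, hc, hd, ih (k + 1) (l ++ [c]) m hp']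
      omega

theorem pvScanRight_spec (q : List Char) (t : List Char) :
    ∀ (j : Nat) (r : List Char), ']' ∉ q →
      pvScanRight (q ++ ']' :: t) j r = (j + q.length, r ++ q) := by
  induction q with
  | nil => intro j r _; simp [pvScanRight]
  | cons c q ih =>
    intro j r hq
    have hc : ¬ (c = ']') := by simp at hq; exact fun h => hq.1 h.symm
    have hq' : ']' ∉ q := by simp at hq; exact hq.2
    simp [pvScanRight, hc, ih (j + 1) (r ++ [c]) hq']
    omega

theorem pv_nobracket {w : List Char} (h : '[' ∉ w) :
    pvA w = w ∧ ∀ stack, pvPeel w stack = (w, stack) := by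
  have hin : PySem.Chars.isIn ['['] w = false := by
    rw [PySem.Chars.isIn_eq_false_iff, List.singleton_infix_iff]; exact h
  constructor
  · rw [pvA]; simp [hin]
  · intro stack; rw [pvPeel]; simp [hin]

theorem pv_main : ∀ (n : Nat) (w : List Char), w.length ≤ n → pvWellFormed n w = true → ∀ stack,
    pvRebuild (pvPeel w stack).2 (pvPeel w stack).1 = pvRebuild stack (pvA w) := by
  intro n
  induction n with
  | zero =>
    intro w hw _ stack
    have hwnil : w = [] := by
      cases w with
      | nil => rfl
      | cons a t => simp at hw
    subst hwnil
    have h := pv_nobracket (w := []) (by simp)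
    rw [h.2 stack, h.1]
  | succ n ih =>
    intro w hw hwf stack
    by_cases hmem : '[' ∈ w
    case neg =>
      have h := pv_nobracket hmem
      rw [h.2 stack, h.1]
    case pos =>
    obtain ⟨p, s, hw1, hp⟩ := pv_mem_split_first hmem
    have hin : PySem.Chars.isIn ['['] w = true := by
      rw [PySem.Chars.isIn_iff_infix, List.singleton_infix_iff]; exact hmem
    have hlenw1 : 1 ≤ w.length := List.length_pos_of_mem hmem
    have hplen : p.length < w.length := by rw [hw1]; simp
    have hidx : PySem.List.index? w '[' = some p.length :=
      (PySem.List.index?_eq_some_iff _ _ _).mpr ⟨p, s, hw1, rfl, hp⟩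
    have hleft : pvScanLeft w 0 [] [] =
        (p.length, p.filter (fun c => ! PySem.Chars.isdigit c), p.filter PySem.Chars.isdigit) := by
      rw [hw1]
      simpa using pvScanLeft_spec p s 0 [] [] hp
    have hhead : PySem.List.slice w none (some (p.length : Int)) = p := by
      rw [PySem.List.slice_to_natCast, hw1, List.take_left]
    have hstart : PySem.List.clampIdx w.length ((p.length : Int) + 1) = min (p.length + 1) w.length := by
      rw [show ((p.length : Int) + 1) = ((p.length + 1 : Nat) : Int) by push_cast; ring,
          PySem.List.clampIdx_natCast]
    -- unfold the well-formedness hypothesis one layer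
    rw [pvWellFormed] at hwf
    simp only [hin, if_true, hidx, Option.getD_some, Bool.and_eq_true, decide_eq_true_eq] at hwf
    obtain ⟨⟨hdig, hinr⟩, hwfmid⟩ := hwf
    have hrmem : ']' ∈ w := by
      have := (PySem.Chars.isIn_iff_infix [']'] w).mp hinr
      rwa [List.singleton_infix_iff] at this
    obtain ⟨q, t, hw2, ht⟩ := pv_mem_split_last hrmem
    have hlenw : w.length = q.length + 1 + t.length := by rw [hw2]; simp; omega
    have hidxr : PySem.List.index? w.reverse ']' = some t.length := by
      refine (PySem.List.index?_eq_some_iff _ _ _).mpr ⟨t.reverse, q.reverse, ?_, by simp, by simpa using ht⟩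
      rw [hw2]; simp
    have hrev : w.reverse = t.reverse ++ ']' :: q.reverse := by rw [hw2]; simp
    have hright : pvScanRight w.reverse 0 [] = (t.length, t.reverse) := by
      rw [hrev]
      simpa using pvScanRight_spec t.reverse q.reverse 0 [] (by simpa using ht)
    have hCB : PySem.List.clampIdx w.length (-(t.length : Int) - 1) = q.length := by
      rw [show (-(t.length : Int) - 1) = -((t.length + 1 : Nat) : Int) by push_cast; ring,
          PySem.List.clampIdx_neg_natCast _ _ (by omega)]
      omega
    have hCq : PySem.List.clampIdx w.length ((q.length : Int)) = q.length := by
      rw [PySem.List.clampIdx_natCast]; omega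
    have hmid : PySem.List.slice w (some ((p.length : Int) + 1)) (some (-(t.length : Int) - 1))
        = PySem.List.slice w (some ((p.length : Int) + 1)) (some ((q.length : Int))) := by
      simp only [PySem.List.slice, hCB, hCq]
    have hmlen : (PySem.List.slice w (some ((p.length : Int) + 1)) (some ((q.length : Int)))).length ≤ n := by
      rw [PySem.List.length_slice, hstart, hCq]; omega
    have hwfmid' : pvWellFormed n (PySem.List.slice w (some ((p.length : Int) + 1)) (some ((q.length : Int)))) = true := by
      rw [hidxr] at hwfmid
      simpa [show w.length - 1 - t.length = q.length by omega] using hwfmid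
    have hrt : PySem.List.slice w (some ((q.length : Int) + 1)) none = t := by
      rw [show ((q.length : Int) + 1) = ((q.length + 1 : Nat) : Int) by push_cast; ring,
          PySem.List.slice_from_natCast, hw2,
          show q ++ ']' :: t = (q ++ [']']) ++ t by simp]
      simp
    -- unfold A one step
    rw [pvA]
    simp only [hin, Bool.true_eq_false, dite_false, hleft, hright]
    -- unfold B one step
    rw [pvPeel]
    simp only [hin, Bool.true_eq_false, dite_false, hidx, hidxr, hhead]
    simp only [show w.length - 1 - t.length = q.length by omega]
    simp only [hmid, hrt]
    cases hm : PySem.Int.ofChars? (List.filter PySem.Chars.isdigit p) with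
    | none => rfl
    | some m =>
      show pvRebuild (pvPeel _ _).2 (pvPeel _ _).1 = _
      rw [ih _ hmlen hwfmid']
      simp [pvRebuild]

theorem pv_equiv (w : List Char) (h : pvWellFormed w.length w = true) :
    pvRebuild (pvPeel w []).2 (pvPeel w []).1 = pvA w :=
  pv_main w.length w le_rfl h []

-- ===== VERDICT (by name: the statement is the Claim_ definition above) =====
theorem translate_word_spec : Claim_equal_translate_word := by
  intro word _ hpre
  unfold Spec_translate_word translate_word translate_word_alt
  show String.ofList (pvA word.toList) =
    String.ofList (pvRebuild (pvPeel word.toList []).2 (pvPeel word.toList []).1)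
  rw [pv_equiv _ hpre]
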